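-- pv_equiv track=rewrite | github.com/mwpwalshe/qb-compiler | src/qb_compiler/ml/layout_predictor.py | _max_shortest_path
-- ===== SOURCE A (Python) =====
-- def _max_shortest_path(qubits: list[int], adjacency: dict[int, list[int]]) -> int:
--     """BFS max shortest path between mapped qubits."""
--     qset = set(qubits)
--     max_dist = 0
--     for src in qubits:
--         dist = {src: 0}
--         queue = [src]
--         idx = 0
--         while idx < len(queue):
--             cur = queue[idx]
--             idx += 1
--             for nb in adjacency[cur]:
--                 if nb in qset and nb not in dist:
--                     dist[nb] = dist[cur] + 1
--                     queue.append(nb)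
--         for tgt in qubits:
--             if tgt in dist:
--                 max_dist = max(max_dist, dist[tgt])
--             else:
--                 max_dist = max(max_dist, len(qubits) * 3)
--     return max_dist
-- ===== SOURCE B (Python) =====
-- def _max_shortest_path(qubits: list[int], adjacency: dict[int, list[int]]) -> int:
--     """Per-source eccentricity by whole-set frontier expansion (no queue, no
--     per-node distance dict): the number of growth rounds until the reachable
--     set stops growing is the farthest distance from src."""
--     qset = set(qubits)
--     best = 0
--     for src in qset:
--         reach = {src}
--         rounds = 0
--         while True:
--             fresh = {nb for cur in reach for nb in adjacency[cur]
--                      if nb in qset and nb not in reach}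
--             if not fresh:
--                 break
--             reach |= fresh
--             rounds += 1
--         best = max(best, rounds if reach == qset else 3 * len(qubits))
--     return best
-- ===== Notes on version B (the rewrite author's own statement) =====
-- stated objective: alternative
-- what changed: A runs a per-source BFS with an explicit queue, index cursor and per-node distance dict and then scans all targets; B instead grows the reachable set by whole-set frontier expansion rounds, using the round count as the source's eccentricity and a single set-equality test for unreachability, with no queue, no distance dict and no inner target loop.
import Mathlib
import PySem

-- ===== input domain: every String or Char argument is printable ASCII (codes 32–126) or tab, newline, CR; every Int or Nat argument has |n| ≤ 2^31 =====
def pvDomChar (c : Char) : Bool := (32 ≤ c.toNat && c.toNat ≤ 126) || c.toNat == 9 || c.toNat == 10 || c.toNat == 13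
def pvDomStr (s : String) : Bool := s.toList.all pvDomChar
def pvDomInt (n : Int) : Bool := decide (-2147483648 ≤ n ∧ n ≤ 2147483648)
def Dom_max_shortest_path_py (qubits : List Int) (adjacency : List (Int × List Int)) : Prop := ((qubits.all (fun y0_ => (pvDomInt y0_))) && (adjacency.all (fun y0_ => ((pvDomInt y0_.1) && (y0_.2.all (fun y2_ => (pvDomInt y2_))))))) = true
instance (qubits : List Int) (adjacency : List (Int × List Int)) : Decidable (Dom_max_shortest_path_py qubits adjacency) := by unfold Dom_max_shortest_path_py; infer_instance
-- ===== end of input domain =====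

-- B replaces A's per-source queue-and-dict BFS by whole-set frontier expansion: the
-- reachable set is grown in rounds and the round count is the eccentricity
-- (objective: alternative algorithm; no speed claim).

-- ===== PORT A =====
-- one step of 'for nb in adjacency[cur]': discover a neighbour
def pvAStep (qset : PySem.Set Int) (cur : Int)
    (s : PySem.Dict Int Int × List Int) (nb : Int) : PySem.Dict Int Int × List Int :=
  if qset.contains nb && !(s.1.contains nb) then
    (s.1.insert nb (s.1.getD cur 0 + 1), s.2 ++ [nb])
  else s

-- 'while idx < len(queue)' as fuelled recursion (fuel qubits.length + 1 is proved sufficient in pvRun below)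
def pvALoop (adj : PySem.Dict Int (List Int)) (qset : PySem.Set Int) :
    Nat → List Int → Nat → PySem.Dict Int Int → PySem.Dict Int Int
  | 0, _, _, dist => dist
  | fuel + 1, queue, idx, dist =>
    if idx < queue.length then
      let cur := queue.getD idx 0
      let p := (adj.getD cur []).foldl (pvAStep qset cur) (dist, queue)
      pvALoop adj qset fuel p.2 (idx + 1) p.1
    else dist

def max_shortest_path_py (qubits : List Int) (adjacency : List (Int × List Int)) : Int :=
  let adj : PySem.Dict Int (List Int) := PySem.Dict.mk adjacency
  let qset : PySem.Set Int := PySem.Set.ofList qubits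
  qubits.foldl (fun md src =>
    let dist := pvALoop adj qset (qubits.length + 1) [src] 0 (PySem.Dict.mk [(src, 0)])
    qubits.foldl (fun md tgt =>
      if dist.contains tgt then max md (dist.getD tgt 0)
      else max md (PySem.List.len qubits * 3)) md) 0

-- ===== PORT B =====
-- 'fresh = {nb for cur in reach for nb in adjacency[cur] if nb in qset and nb not in reach}'
def pvBFresh (adj : PySem.Dict Int (List Int)) (qset reach : PySem.Set Int) : PySem.Set Int :=
  reach.foldl (fun s cur =>
    (adj.getD cur []).foldl (fun s nb =>
      if qset.contains nb && !(reach.contains nb) then PySem.Set.add s nb else s) s)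
    PySem.Set.empty

-- 'while True: ... break' as fuelled recursion (fuel qubits.length is proved sufficient in pvBRun below)
def pvBLoop (adj : PySem.Dict Int (List Int)) (qset : PySem.Set Int) :
    Nat → PySem.Set Int → Int → PySem.Set Int × Int
  | 0, reach, rounds => (reach, rounds)
  | fuel + 1, reach, rounds =>
    let fresh := pvBFresh adj qset reach
    if fresh.isEmpty then (reach, rounds)
    else pvBLoop adj qset fuel (PySem.Set.union reach fresh) (rounds + 1)

def max_shortest_path_py_alt (qubits : List Int) (adjacency : List (Int × List Int)) : Int :=
  let adj : PySem.Dict Int (List Int) := PySem.Dict.mk adjacency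
  let qset : PySem.Set Int := PySem.Set.ofList qubits
  qset.foldl (fun best src =>
    let rr := pvBLoop adj qset qubits.length (PySem.Set.add PySem.Set.empty src) 0
    max best (if PySem.Set.equal rr.1 qset then rr.2 else 3 * PySem.List.len qubits)) 0

-- ===== PRECONDITION & SPEC =====
-- Pre_ excludes exactly the inputs on which Python A raises KeyError: a qubit missing
-- from the adjacency dict (every node A or B ever looks up is a member of qubits).
def Pre_max_shortest_path_py (qubits : List Int) (adjacency : List (Int × List Int)) : Prop :=
  ∀ q ∈ qubits, (PySem.Dict.mk adjacency).contains q = true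
instance (qubits : List Int) (adjacency : List (Int × List Int)) : Decidable (Pre_max_shortest_path_py qubits adjacency) := by unfold Pre_max_shortest_path_py; infer_instance

def pvWitness_max_shortest_path_py : List Int × (List (Int × List Int)) :=
  ([0, 1, 2], [(0, [1]), (1, [0, 2]), (2, [1])])

def Spec_max_shortest_path_py (qubits : List Int) (adjacency : List (Int × List Int)) (out : Int) : Prop := out = max_shortest_path_py_alt qubits adjacency
instance (qubits : List Int) (adjacency : List (Int × List Int)) (out : Int) : Decidable (Spec_max_shortest_path_py qubits adjacency out) := by unfold Spec_max_shortest_path_py; infer_instance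

-- ===== CLAIM (what is proved, stated in full; the proofs are below) =====
def Claim_equal_max_shortest_path_py : Prop := ∀ (qubits : List Int) (adjacency : List (Int × List Int)), Dom_max_shortest_path_py qubits adjacency → Pre_max_shortest_path_py qubits adjacency → Spec_max_shortest_path_py qubits adjacency (max_shortest_path_py qubits adjacency)

-- ===== LEMMAS AND PROOFS =====

def pvDisc (qs : List Int) : List Int → List Int → List Int
  | _, [] => []
  | base, nb :: t =>
    if nb ∈ qs ∧ nb ∉ base then nb :: pvDisc qs (base ++ [nb]) t
    else pvDisc qs base t
def pvDiscAll (adjf : Int → List Int) (qs : List Int) : List Int → List Int → List Int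
  | _, [] => []
  | base, cur :: t =>
    pvDisc qs base (adjf cur) ++
      pvDiscAll adjf qs (base ++ pvDisc qs base (adjf cur)) t

theorem pvDisc_sub (qs : List Int) :
    ∀ nbs base v, v ∈ pvDisc qs base nbs → v ∈ qs ∧ v ∉ base := by
  intro nbs
  induction nbs with
  | nil => simp [pvDisc]
  | cons nb t ih =>
    intro base v hv
    simp only [pvDisc] at hv
    split at hv
    · rename_i h
      rcases List.mem_cons.1 hv with rfl | hv
      · exact h
      · have := ih _ _ hv
        refine ⟨this.1, fun hb => this.2 (by simp [hb])⟩
    · exact ih _ _ hv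

theorem pvDisc_nodup_append (qs : List Int) :
    ∀ nbs base, base.Nodup → (base ++ pvDisc qs base nbs).Nodup := by
  intro nbs
  induction nbs with
  | nil => simpa [pvDisc]
  | cons nb t ih =>
    intro base hb
    simp only [pvDisc]
    split
    · rename_i h
      have := ih (base ++ [nb]) (by simp [List.nodup_append, hb]; intro a ha rfl; exact h.2 ha)
      simpa using this
    · exact ih base hb

theorem pvDisc_nil_of_closed (qs : List Int) :
    ∀ nbs base, (∀ nb ∈ nbs, nb ∈ qs → nb ∈ base) → pvDisc qs base nbs = [] := by
  intro nbs
  induction nbs with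
  | nil => simp [pvDisc]
  | cons nb t ih =>
    intro base h
    have h1 : ¬ (nb ∈ qs ∧ nb ∉ base) := by
      rintro ⟨hq, hb⟩; exact hb (h nb (by simp) hq)
    simp only [pvDisc, if_neg h1]
    exact ih base (fun x hx => h x (by simp [hx]))

theorem pvDisc_mem (qs : List Int) :
    ∀ nbs base nb, nb ∈ nbs → nb ∈ qs → nb ∈ base ++ pvDisc qs base nbs := by
  intro nbs
  induction nbs with
  | nil => simp
  | cons x t ih =>
    intro base nb hnb hq
    simp only [pvDisc]
    rcases List.mem_cons.1 hnb with rfl | hnb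
    · split
      · simp
      · rename_i h
        have hb : nb ∈ base := by
          by_contra hb; exact h ⟨hq, hb⟩
        simp [hb]
    · split
      · have := ih (base ++ [x]) nb hnb hq
        simpa using this
      · exact ih base nb hnb hq

theorem pvDiscAll_sub (adjf : Int → List Int) (qs : List Int) :
    ∀ todo base v, v ∈ pvDiscAll adjf qs base todo → v ∈ qs ∧ v ∉ base := by
  intro todo
  induction todo with
  | nil => simp [pvDiscAll]
  | cons cur t ih =>
    intro base v hv
    simp only [pvDiscAll, List.mem_append] at hv
    rcases hv with hv | hv
    · exact pvDisc_sub qs _ _ _ hv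
    · have := ih _ _ hv
      exact ⟨this.1, fun hb => this.2 (by simp [hb])⟩

theorem pvDiscAll_nodup_append (adjf : Int → List Int) (qs : List Int) :
    ∀ todo base, base.Nodup → (base ++ pvDiscAll adjf qs base todo).Nodup := by
  intro todo
  induction todo with
  | nil => simpa [pvDiscAll]
  | cons cur t ih =>
    intro base hb
    simp only [pvDiscAll]
    have := ih (base ++ pvDisc qs base (adjf cur)) (pvDisc_nodup_append qs _ _ hb)
    simpa using this

theorem pvDiscAll_append (adjf : Int → List Int) (qs : List Int) :
    ∀ t₁ t₂ base, pvDiscAll adjf qs base (t₁ ++ t₂) =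
      pvDiscAll adjf qs base t₁ ++
        pvDiscAll adjf qs (base ++ pvDiscAll adjf qs base t₁) t₂ := by
  intro t₁
  induction t₁ with
  | nil => simp [pvDiscAll]
  | cons cur t ih =>
    intro t₂ base
    simp only [List.cons_append, pvDiscAll, ih, List.append_assoc]

theorem pvDiscAll_nil_of_closed (adjf : Int → List Int) (qs : List Int) :
    ∀ pre base, (∀ cur ∈ pre, ∀ nb ∈ adjf cur, nb ∈ qs → nb ∈ base) →
      pvDiscAll adjf qs base pre = [] := by
  intro pre
  induction pre with
  | nil => simp [pvDiscAll]
  | cons cur t ih =>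
    intro base h
    have h1 : pvDisc qs base (adjf cur) = [] :=
      pvDisc_nil_of_closed qs _ _ (h cur (by simp))
    simp only [pvDiscAll, h1, List.append_nil, List.nil_append]
    exact ih base (fun x hx => h x (by simp [hx]))

theorem pvDiscAll_mem (adjf : Int → List Int) (qs : List Int) :
    ∀ todo base cur nb, cur ∈ todo → nb ∈ adjf cur → nb ∈ qs →
      nb ∈ base ++ pvDiscAll adjf qs base todo := by
  intro todo
  induction todo with
  | nil => simp
  | cons x t ih =>
    intro base cur nb hcur hnb hq
    simp only [pvDiscAll]
    rcases List.mem_cons.1 hcur with rfl | hcur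
    · have := pvDisc_mem qs (adjf cur) base nb hnb hq
      simp only [List.mem_append] at this ⊢
      tauto
    · have := ih (base ++ pvDisc qs base (adjf x)) cur nb hcur hnb hq
      simpa [List.append_assoc] using this

def pvRS (adjf : Int → List Int) (qs : List Int) (src : Int) : Nat → List Int
  | 0 => [src]
  | k + 1 => pvRS adjf qs src k ++
      pvDiscAll adjf qs (pvRS adjf qs src k) (pvRS adjf qs src k)

theorem pvRS_nodup (adjf : Int → List Int) (qs : List Int) (src : Int) :
    ∀ k, (pvRS adjf qs src k).Nodup := by
  intro k
  induction k with
  | zero => simp [pvRS]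
  | succ k ih => exact pvDiscAll_nodup_append adjf qs _ _ ih

theorem pvRS_sub (adjf : Int → List Int) (qs : List Int) (src : Int) :
    ∀ k v, v ∈ pvRS adjf qs src k → v ∈ src :: qs := by
  intro k
  induction k with
  | zero => simp [pvRS]
  | succ k ih =>
    intro v hv
    rcases List.mem_append.1 hv with hv | hv
    · exact ih v hv
    · exact List.mem_cons_of_mem _ (pvDiscAll_sub adjf qs _ _ _ hv).1


theorem pvRS_closed (adjf : Int → List Int) (qs : List Int) (src : Int) (k : Nat) :
    ∀ cur ∈ pvRS adjf qs src k, ∀ nb ∈ adjf cur, nb ∈ qs →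
      nb ∈ pvRS adjf qs src (k + 1) := by
  intro cur hcur nb hnb hq
  exact pvDiscAll_mem adjf qs _ _ cur nb hcur hnb hq


theorem pvRS_len_lt (adjf : Int → List Int) (qs : List Int) (src : Int) (k : Nat)
    (h : pvDiscAll adjf qs (pvRS adjf qs src k) (pvRS adjf qs src k) ≠ []) :
    (pvRS adjf qs src k).length < (pvRS adjf qs src (k + 1)).length := by
  simp only [pvRS, List.length_append]
  have := List.length_pos_iff.2 h
  omega

theorem pvRS_len_le (adjf : Int → List Int) (qs : List Int) (src : Int) (k : Nat) :
    (pvRS adjf qs src k).length ≤ qs.length + 1 := by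
  have h1 : (pvRS adjf qs src k).Nodup := pvRS_nodup adjf qs src k
  have h2 : pvRS adjf qs src k ⊆ src :: qs := fun v hv => pvRS_sub adjf qs src k v hv
  have := (h1.subperm h2).length_le
  simpa using this

theorem pvEx (adjf : Int → List Int) (qs : List Int) (src : Int) :
    ∃ k, pvDiscAll adjf qs (pvRS adjf qs src k) (pvRS adjf qs src k) = [] := by
  by_contra h
  push_neg at h
  have grow : ∀ k, k + 1 ≤ (pvRS adjf qs src k).length := by
    intro k
    induction k with
    | zero => simp [pvRS]
    | succ k ih =>
      have := pvRS_len_lt adjf qs src k (h k)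
      omega
  have := grow (qs.length + 1)
  have := pvRS_len_le adjf qs src (qs.length + 1)
  omega

-- the first round that discovers nothing: the BFS from src stabilizes at pvRS … pvM
def pvM (adjf : Int → List Int) (qs : List Int) (src : Int) : Nat :=
  Nat.find (pvEx adjf qs src)

theorem pvM_stab (adjf : Int → List Int) (qs : List Int) (src : Int) :
    pvDiscAll adjf qs (pvRS adjf qs src (pvM adjf qs src))
      (pvRS adjf qs src (pvM adjf qs src)) = [] :=
  Nat.find_spec (pvEx adjf qs src)

theorem pvM_lt (adjf : Int → List Int) (qs : List Int) (src : Int) (k : Nat)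
    (hk : k < pvM adjf qs src) :
    pvDiscAll adjf qs (pvRS adjf qs src k) (pvRS adjf qs src k) ≠ [] :=
  Nat.find_min (pvEx adjf qs src) hk

theorem pvM_ge (adjf : Int → List Int) (qs : List Int) (src : Int) :
    pvM adjf qs src + 1 ≤ (pvRS adjf qs src (pvM adjf qs src)).length := by
  have grow : ∀ k, k ≤ pvM adjf qs src → k + 1 ≤ (pvRS adjf qs src k).length := by
    intro k
    induction k with
    | zero => intro _; simp [pvRS]
    | succ k ih =>
      intro hk
      have h1 := pvRS_len_lt adjf qs src k (pvM_lt adjf qs src k (by omega))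
      have := ih (by omega)
      omega
  exact grow _ le_rfl


def pvPairs (adjf : Int → List Int) (qs : List Int) (src : Int) : Nat → List (Int × Int)
  | 0 => [(src, 0)]
  | k + 1 => pvPairs adjf qs src k ++
      (pvDiscAll adjf qs (pvRS adjf qs src k) (pvRS adjf qs src k)).map
        (fun v => (v, ((k : Int) + 1)))

theorem pvPairs_fst (adjf : Int → List Int) (qs : List Int) (src : Int) :
    ∀ k, (pvPairs adjf qs src k).map Prod.fst = pvRS adjf qs src k := by
  intro k
  induction k with
  | zero => simp [pvPairs, pvRS]
  | succ k ih => simp [pvPairs, pvRS, ih, Function.comp_def]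

theorem pvPairs_val_le (adjf : Int → List Int) (qs : List Int) (src : Int) :
    ∀ k p, p ∈ pvPairs adjf qs src k → 0 ≤ p.2 ∧ p.2 ≤ (k : Int) := by
  intro k
  induction k with
  | zero => intro p hp; simp [pvPairs] at hp; simp [hp]
  | succ k ih =>
    intro p hp
    simp only [pvPairs, List.mem_append, List.mem_map] at hp
    rcases hp with hp | ⟨v, _, rfl⟩
    · have := ih p hp
      push_cast
      omega
    · push_cast
      omega

theorem pvPairs_mono (adjf : Int → List Int) (qs : List Int) (src : Int) (k j : Nat)
    (h : k ≤ j) : ∀ p ∈ pvPairs adjf qs src k, p ∈ pvPairs adjf qs src j := by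
  obtain ⟨i, rfl⟩ := Nat.exists_eq_add_of_le h
  clear h
  intro p hp
  induction i with
  | zero => exact hp
  | succ i ih => simp only [← Nat.add_assoc, pvPairs, List.mem_append]; left; exact ih



theorem pvALoop_exit (adj : PySem.Dict Int (List Int)) (qset : PySem.Set Int)
    (f : Nat) (q : List Int) (i : Nat) (d : PySem.Dict Int Int) (h : ¬ i < q.length) :
    pvALoop adj qset f q i d = d := by
  cases f <;> simp [pvALoop, h]
theorem pvDict_contains (L : List (Int × Int)) (nb : Int) :
    (PySem.Dict.mk L).contains nb = decide (nb ∈ L.map Prod.fst) := by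
  induction L with
  | nil => simp [PySem.Dict.contains]
  | cons p t ih =>
    simp only [PySem.Dict.contains, List.any_cons, List.map_cons, List.mem_cons] at *
    by_cases h : p.1 = nb <;> simp [h, ih, eq_comm (a := nb)]

theorem pvDict_getD (L : List (Int × Int)) (k c : Int)
    (hmem : (k, c) ∈ L) (hnd : (L.map Prod.fst).Nodup) :
    (PySem.Dict.mk L).getD k 0 = c := by
  exact PySem.Dict.getD_of_mem_items _ hmem (by simpa [PySem.Dict.keys] using hnd) 0

theorem pvFold_step (qs : List Int) (cur : Int) (c : Int) :
    ∀ (nbs : List Int) (L : List (Int × Int)) (queue : List Int),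
      L.map Prod.fst = queue → queue.Nodup → (cur, c) ∈ L →
      nbs.foldl (pvAStep qs cur) (PySem.Dict.mk L, queue) =
        (PySem.Dict.mk (L ++ (pvDisc qs queue nbs).map (fun v => (v, c + 1))),
          queue ++ pvDisc qs queue nbs) := by
  intro nbs
  induction nbs with
  | nil => intro L queue h1 h2 h3; simp [pvDisc]
  | cons nb t ih =>
    intro L queue h1 h2 h3
    simp only [List.foldl_cons, pvDisc]
    have hcont : (PySem.Dict.mk L).contains nb = decide (nb ∈ queue) := by
      rw [pvDict_contains, h1]
    have hqs : (PySem.Set.contains qs nb) = decide (nb ∈ qs) := by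
      simp [PySem.Set.contains, List.contains_iff_mem]
    by_cases hc : nb ∈ qs ∧ nb ∉ queue
    · have hstep : pvAStep qs cur (PySem.Dict.mk L, queue) nb =
          (PySem.Dict.mk (L ++ [(nb, c + 1)]), queue ++ [nb]) := by
        simp only [pvAStep, hcont, hqs, hc.1, hc.2, decide_true, decide_false,
          Bool.not_false, Bool.and_true, if_true]
        congr 1
        have hnotc : (PySem.Dict.mk L).contains nb = false := by
          simp [hcont, hc.2]
        rw [pvDict_getD L cur c h3 (by rw [h1]; exact h2)]
        have := PySem.Dict.items_insert_of_not_contains (d := PySem.Dict.mk L)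
          (k := nb) (v := c + 1) hnotc
        exact PySem.Dict.ext this
      rw [hstep, if_pos hc]
      rw [ih (L ++ [(nb, c + 1)]) (queue ++ [nb])
        (by simp [h1]) (by simp [List.nodup_append, h2]; intro a ha rfl; exact hc.2 ha)
        (by simp [h3])]
      simp [List.append_assoc]
    · have hstep : pvAStep qs cur (PySem.Dict.mk L, queue) nb = (PySem.Dict.mk L, queue) := by
        simp only [pvAStep, hcont, hqs]
        rcases not_and_or.1 hc with h | h
        · simp [h]
        · simp only [not_not] at h
          simp [h]
      rw [hstep, if_neg hc]
      exact ih L queue h1 h2 h3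

def pvAdjf (adj : PySem.Dict Int (List Int)) : Int → List Int := fun c => adj.getD c []

def pvF (adjf : Int → List Int) (qs : List Int) (src : Int) : Nat → List Int
  | 0 => [src]
  | k + 1 => pvDiscAll adjf qs (pvRS adjf qs src k) (pvRS adjf qs src k)

def pvPrev (adjf : Int → List Int) (qs : List Int) (src : Int) : Nat → Nat
  | 0 => 0
  | k + 1 => (pvRS adjf qs src k).length

theorem pvRS_decomp (adjf : Int → List Int) (qs : List Int) (src : Int) (k : Nat) :
    ∃ pre, pvRS adjf qs src k = pre ++ pvF adjf qs src k ∧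
      pre.length = pvPrev adjf qs src k ∧
      (∀ cur ∈ pre, ∀ nb ∈ adjf cur, nb ∈ qs → nb ∈ pvRS adjf qs src k) := by
  cases k with
  | zero => exact ⟨[], by simp [pvRS, pvF, pvPrev]⟩
  | succ k =>
    refine ⟨pvRS adjf qs src k, rfl, rfl, ?_⟩
    intro cur hcur nb hnb hq
    exact pvRS_closed adjf qs src k cur hcur nb hnb hq

theorem pvF_discAll (adjf : Int → List Int) (qs : List Int) (src : Int) (k : Nat) :
    pvDiscAll adjf qs (pvRS adjf qs src k) (pvF adjf qs src k) =
      pvDiscAll adjf qs (pvRS adjf qs src k) (pvRS adjf qs src k) := by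
  obtain ⟨pre, hdec, _, hclosed⟩ := pvRS_decomp adjf qs src k
  nth_rewrite 3 [hdec]
  rw [pvDiscAll_append]
  rw [pvDiscAll_nil_of_closed adjf qs pre _ (by
    intro cur hcur nb hnb hq
    exact hclosed cur hcur nb hnb hq)]
  simp

theorem pvPrev_add (adjf : Int → List Int) (qs : List Int) (src : Int) (k : Nat) :
    pvPrev adjf qs src k + (pvF adjf qs src k).length = (pvRS adjf qs src k).length := by
  obtain ⟨pre, hdec, hlen, _⟩ := pvRS_decomp adjf qs src k
  rw [hdec]
  simp [hlen]

theorem pvF_pair (adjf : Int → List Int) (qs : List Int) (src : Int) (k : Nat)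
    (cur : Int) (h : cur ∈ pvF adjf qs src k) :
    (cur, (k : Int)) ∈ pvPairs adjf qs src k := by
  cases k with
  | zero => simp [pvF] at h; simp [pvPairs, h]
  | succ k =>
    simp only [pvPairs, List.mem_append, List.mem_map]
    right
    exact ⟨cur, h, by push_cast; ring_nf⟩

theorem pvLevel (adj : PySem.Dict Int (List Int)) (qs : List Int) (src : Int) (k : Nat) :
    ∀ (Trest T : List Int) (f : Nat),
      pvF (pvAdjf adj) qs src k = T ++ Trest →
      pvALoop adj qs (Trest.length + f)
        (pvRS (pvAdjf adj) qs src k ++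
          pvDiscAll (pvAdjf adj) qs (pvRS (pvAdjf adj) qs src k) T)
        (pvPrev (pvAdjf adj) qs src k + T.length)
        (PySem.Dict.mk (pvPairs (pvAdjf adj) qs src k ++
          (pvDiscAll (pvAdjf adj) qs (pvRS (pvAdjf adj) qs src k) T).map
            (fun v => (v, (k : Int) + 1)))) =
      pvALoop adj qs f (pvRS (pvAdjf adj) qs src (k + 1))
        (pvPrev (pvAdjf adj) qs src (k + 1))
        (PySem.Dict.mk (pvPairs (pvAdjf adj) qs src (k + 1))) := by
  intro Trest
  induction Trest with
  | nil =>
    intro T f hT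
    rw [List.append_nil] at hT
    subst hT
    rw [pvF_discAll, pvPrev_add]
    simp only [List.length_nil, Nat.zero_add]
    rfl
  | cons cur T' ih =>
    intro T f hT
    have hcurF : cur ∈ pvF (pvAdjf adj) qs src k := by
      rw [hT]; simp
    obtain ⟨pre, hdec, hlen, _⟩ := pvRS_decomp (pvAdjf adj) qs src k
    have hFlen : pvPrev (pvAdjf adj) qs src k + (pvF (pvAdjf adj) qs src k).length =
        (pvRS (pvAdjf adj) qs src k).length := pvPrev_add (pvAdjf adj) qs src k
    have hlt : pvPrev (pvAdjf adj) qs src k + T.length <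
        (pvRS (pvAdjf adj) qs src k ++
          pvDiscAll (pvAdjf adj) qs (pvRS (pvAdjf adj) qs src k) T).length := by
      rw [List.length_append]
      have : (pvF (pvAdjf adj) qs src k).length = T.length + (T'.length + 1) := by
        rw [hT]; simp
      omega
    have hget : (pvRS (pvAdjf adj) qs src k ++
        pvDiscAll (pvAdjf adj) qs (pvRS (pvAdjf adj) qs src k) T).getD
          (pvPrev (pvAdjf adj) qs src k + T.length) 0 = cur := by
      have hre : pvRS (pvAdjf adj) qs src k ++
          pvDiscAll (pvAdjf adj) qs (pvRS (pvAdjf adj) qs src k) T =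
          (pre ++ T) ++ cur :: (T' ++
            pvDiscAll (pvAdjf adj) qs (pvRS (pvAdjf adj) qs src k) T) := by
        rw [hdec, hT]; simp
      rw [hre, ← hlen]
      have : pre.length + T.length = (pre ++ T).length := by simp
      rw [this]
      simp [List.getD_eq_getElem?_getD, List.getElem?_append_right]
    -- one loop step
    have hfuel : (cur :: T').length + f = (T'.length + f) + 1 := by simp; omega
    rw [hfuel]
    simp only [pvALoop, if_pos hlt, hget]
    -- the inner for-loop over the neighbours of cur
    have hfold := pvFold_step qs cur (k : Int) (adj.getD cur [])
      (pvPairs (pvAdjf adj) qs src k ++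
        (pvDiscAll (pvAdjf adj) qs (pvRS (pvAdjf adj) qs src k) T).map
          (fun v => (v, (k : Int) + 1)))
      (pvRS (pvAdjf adj) qs src k ++
        pvDiscAll (pvAdjf adj) qs (pvRS (pvAdjf adj) qs src k) T)
      (by
        simp only [List.map_append, pvPairs_fst, List.map_map]
        congr 1
        simp [Function.comp_def])
      (pvDiscAll_nodup_append (pvAdjf adj) qs T _ (pvRS_nodup (pvAdjf adj) qs src k))
      (by
        exact List.mem_append.2 (Or.inl (pvF_pair (pvAdjf adj) qs src k cur hcurF)))
    rw [hfold]
    have hT' : pvF (pvAdjf adj) qs src k = (T ++ [cur]) ++ T' := by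
      rw [hT]; simp
    have hstep := ih (T ++ [cur]) f hT'
    have hda : pvDiscAll (pvAdjf adj) qs (pvRS (pvAdjf adj) qs src k) (T ++ [cur]) =
        pvDiscAll (pvAdjf adj) qs (pvRS (pvAdjf adj) qs src k) T ++
          pvDisc qs (pvRS (pvAdjf adj) qs src k ++
            pvDiscAll (pvAdjf adj) qs (pvRS (pvAdjf adj) qs src k) T)
            (adj.getD cur []) := by
      rw [pvDiscAll_append]
      simp [pvDiscAll, pvAdjf]
    rw [hda] at hstep
    simp only [List.length_append, List.length_cons, List.length_nil] at hstep ⊢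
    have harr : pvPrev (pvAdjf adj) qs src k + (T.length + (0 + 1)) =
        pvPrev (pvAdjf adj) qs src k + T.length + 1 := by omega
    rw [harr] at hstep
    simp only [List.map_append, List.append_assoc] at hstep ⊢
    exact hstep

theorem pvRS_len_mono (adjf : Int → List Int) (qs : List Int) (src : Int) (k j : Nat)
    (h : k ≤ j) : (pvRS adjf qs src k).length ≤ (pvRS adjf qs src j).length := by
  obtain ⟨i, rfl⟩ := Nat.exists_eq_add_of_le h
  clear h
  induction i with
  | zero => exact le_rfl
  | succ i ih =>
    have : pvRS adjf qs src (k + (i+1)) = pvRS adjf qs src (k+i) ++ _ := rfl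
    rw [this, List.length_append]
    omega

theorem pvRun (adj : PySem.Dict Int (List Int)) (qs : List Int) (src : Int) :
    ∀ (K k : Nat), k + K = pvM (pvAdjf adj) qs src → ∀ f,
      pvALoop adj qs
        (((pvRS (pvAdjf adj) qs src (pvM (pvAdjf adj) qs src)).length -
          pvPrev (pvAdjf adj) qs src k) + f)
        (pvRS (pvAdjf adj) qs src k) (pvPrev (pvAdjf adj) qs src k)
        (PySem.Dict.mk (pvPairs (pvAdjf adj) qs src k)) =
      PySem.Dict.mk (pvPairs (pvAdjf adj) qs src (pvM (pvAdjf adj) qs src + 1)) := by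
  intro K
  induction K with
  | zero =>
    intro k hk f
    -- k = m: process the last frontier, then exit
    have hlev := pvLevel adj qs src k (pvF (pvAdjf adj) qs src k) [] f (by simp)
    simp only [pvDiscAll, List.append_nil, List.map_nil, List.length_nil, Nat.add_zero] at hlev
    have hflen : (pvF (pvAdjf adj) qs src k).length =
        (pvRS (pvAdjf adj) qs src (pvM (pvAdjf adj) qs src)).length -
          pvPrev (pvAdjf adj) qs src k := by
      have := pvPrev_add (pvAdjf adj) qs src k
      have hkm : k = pvM (pvAdjf adj) qs src := by omega
      subst hkm
      omega
    rw [← hflen]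
    rw [hlev]
    have hkm : k = pvM (pvAdjf adj) qs src := by omega
    subst hkm
    have hstab := pvM_stab (pvAdjf adj) qs src
    have hq : pvRS (pvAdjf adj) qs src (pvM (pvAdjf adj) qs src + 1) =
        pvRS (pvAdjf adj) qs src (pvM (pvAdjf adj) qs src) := by
      show pvRS _ qs src (pvM (pvAdjf adj) qs src) ++ _ = _
      rw [hstab, List.append_nil]
    apply pvALoop_exit
    rw [hq]
    show ¬ pvPrev (pvAdjf adj) qs src (pvM (pvAdjf adj) qs src + 1) < _
    simp [pvPrev]
  | succ K ih =>
    intro k hk f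
    have hlev := pvLevel adj qs src k (pvF (pvAdjf adj) qs src k) []
      (((pvRS (pvAdjf adj) qs src (pvM (pvAdjf adj) qs src)).length -
        pvPrev (pvAdjf adj) qs src (k + 1)) + f) (by simp)
    simp only [pvDiscAll, List.append_nil, List.map_nil, List.length_nil, Nat.add_zero] at hlev
    have harith : ((pvRS (pvAdjf adj) qs src (pvM (pvAdjf adj) qs src)).length -
          pvPrev (pvAdjf adj) qs src k) + f =
        (pvF (pvAdjf adj) qs src k).length +
          (((pvRS (pvAdjf adj) qs src (pvM (pvAdjf adj) qs src)).length -
            pvPrev (pvAdjf adj) qs src (k + 1)) + f) := by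
      have h1 := pvPrev_add (pvAdjf adj) qs src k
      have h2 : pvPrev (pvAdjf adj) qs src (k + 1) =
          (pvRS (pvAdjf adj) qs src k).length := rfl
      have h3 : (pvRS (pvAdjf adj) qs src k).length ≤
          (pvRS (pvAdjf adj) qs src (pvM (pvAdjf adj) qs src)).length :=
        pvRS_len_mono (pvAdjf adj) qs src k _ (by omega)
      omega
    rw [harith, hlev]
    exact ih (k + 1) (by omega) f



theorem pvBFresh_inner (adj : PySem.Dict Int (List Int)) (qs reach : List Int) :
    ∀ (nbs s : List Int),
      nbs.foldl (fun s nb =>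
        if PySem.Set.contains qs nb && !(PySem.Set.contains reach nb)
        then PySem.Set.add s nb else s) s = s ++ pvDisc qs (reach ++ s) nbs := by
  intro nbs
  induction nbs with
  | nil => intro s; simp [pvDisc]
  | cons nb t ih =>
    intro s
    simp only [List.foldl_cons, pvDisc]
    by_cases hc : nb ∈ qs ∧ nb ∉ reach ++ s
    · have : (if PySem.Set.contains qs nb && !(PySem.Set.contains reach nb)
          then PySem.Set.add s nb else s) = s ++ [nb] := by
        simp only [List.mem_append, not_or] at hc
        simp [PySem.Set.contains, PySem.Set.add, List.contains_iff_mem, hc.1, hc.2.1, hc.2.2]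
      rw [this, if_pos hc, ih]
      simp [List.append_assoc]
    · have : (if PySem.Set.contains qs nb && !(PySem.Set.contains reach nb)
          then PySem.Set.add s nb else s) = s := by
        simp only [List.mem_append, not_or] at hc
        push_neg at hc
        by_cases h1 : nb ∈ qs
        · by_cases h2 : nb ∈ reach
          · simp [PySem.Set.contains, List.contains_iff_mem, h2]
          · have h3 : nb ∈ s := hc h1 h2
            simp [PySem.Set.contains, PySem.Set.add, List.contains_iff_mem, h3]
        · simp [PySem.Set.contains, List.contains_iff_mem, h1]
      rw [this, if_neg hc, ih]

theorem pvBFresh_eq (adj : PySem.Dict Int (List Int)) (qs reach : List Int) :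
    pvBFresh adj qs reach = pvDiscAll (pvAdjf adj) qs reach reach := by
  have outer : ∀ (todo s : List Int),
      todo.foldl (fun s cur =>
        (adj.getD cur []).foldl (fun s nb =>
          if PySem.Set.contains qs nb && !(PySem.Set.contains reach nb)
          then PySem.Set.add s nb else s) s) s =
      s ++ pvDiscAll (pvAdjf adj) qs (reach ++ s) todo := by
    intro todo
    induction todo with
    | nil => intro s; simp [pvDiscAll]
    | cons cur t ih =>
      intro s
      simp only [List.foldl_cons]
      rw [pvBFresh_inner adj qs reach (adj.getD cur []) s, ih]
      simp only [pvDiscAll, pvAdjf, List.append_assoc]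
  have := outer reach []
  simpa [pvBFresh, PySem.Set.empty] using this

theorem pvSet_union_disjoint : ∀ (t s : List Int), t.Nodup → (∀ x ∈ t, x ∉ s) →
    PySem.Set.union s t = s ++ t := by
  intro t
  induction t with
  | nil => intro s _ _; simp [PySem.Set.union, PySem.Set.update]
  | cons x t ih =>
    intro s hnd hdis
    have hx : PySem.Set.add s x = s ++ [x] := by
      simp [PySem.Set.add, PySem.Set.contains, List.contains_iff_mem, hdis x (by simp)]
    show (x :: t).foldl PySem.Set.add s = _
    simp only [List.foldl_cons, hx]
    have := ih (s ++ [x]) (List.Nodup.of_cons hnd) (by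
      intro y hy
      simp only [List.mem_append, List.mem_singleton, not_or]
      refine ⟨hdis y (by simp [hy]), ?_⟩
      rintro rfl
      exact (List.nodup_cons.1 hnd).1 hy)
    exact this.trans (by simp)

theorem pvBRun (adj : PySem.Dict Int (List Int)) (qs : List Int) (src : Int) :
    ∀ (K k : Nat), k + K = pvM (pvAdjf adj) qs src → ∀ f, K + 1 ≤ f →
      pvBLoop adj qs f (pvRS (pvAdjf adj) qs src k) (k : Int) =
        (pvRS (pvAdjf adj) qs src (pvM (pvAdjf adj) qs src),
          ((pvM (pvAdjf adj) qs src : Int))) := by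
  intro K
  induction K with
  | zero =>
    intro k hk f hf
    obtain ⟨f', rfl⟩ := Nat.exists_eq_add_of_le hf
    have hkm : k = pvM (pvAdjf adj) qs src := by omega
    subst hkm
    show pvBLoop adj qs (1 + f') _ _ = _
    have h1 : 1 + f' = f' + 1 := by omega
    rw [h1]
    simp only [pvBLoop, pvBFresh_eq, pvM_stab, List.isEmpty_nil, if_pos]
  | succ K ih =>
    intro k hk f hf
    obtain ⟨f', rfl⟩ := Nat.exists_eq_add_of_le hf
    have h1 : K + 1 + 1 + f' = (K + 1 + f') + 1 := by omega
    rw [h1]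
    have hne : pvDiscAll (pvAdjf adj) qs (pvRS (pvAdjf adj) qs src k)
        (pvRS (pvAdjf adj) qs src k) ≠ [] := pvM_lt (pvAdjf adj) qs src k (by omega)
    have hun : PySem.Set.union (pvRS (pvAdjf adj) qs src k)
        (pvDiscAll (pvAdjf adj) qs (pvRS (pvAdjf adj) qs src k)
          (pvRS (pvAdjf adj) qs src k)) = pvRS (pvAdjf adj) qs src (k + 1) := by
      rw [pvSet_union_disjoint _ _
        (((pvDiscAll_nodup_append (pvAdjf adj) qs _ _
          (pvRS_nodup (pvAdjf adj) qs src k))).of_append_right)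
        (fun x hx => (pvDiscAll_sub (pvAdjf adj) qs _ _ x hx).2)]
      rfl
    simp only [pvBLoop, pvBFresh_eq]
    rw [if_neg (by simpa [List.isEmpty_iff] using hne)]
    have : ((k : Int) + 1) = (((k + 1 : Nat)) : Int) := by push_cast; ring
    rw [hun, this]
    exact ih (k + 1) (by omega) (K + 1 + f') (by omega)

theorem pvMfold_le_iff (g : Int → Int) :
    ∀ (l : List Int) (a c : Int),
      l.foldl (fun x t => max x (g t)) a ≤ c ↔ (a ≤ c ∧ ∀ t ∈ l, g t ≤ c) := by
  intro l
  induction l with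
  | nil => simp
  | cons x t ih =>
    intro a c
    simp only [List.foldl_cons, ih, max_le_iff, List.mem_cons]
    constructor
    · rintro ⟨⟨h1, h2⟩, h3⟩
      exact ⟨h1, fun u hu => by rcases hu with rfl | hu; exact h2; exact h3 u hu⟩
    · rintro ⟨h1, h2⟩
      exact ⟨⟨h1, h2 x (Or.inl rfl)⟩, fun u hu => h2 u (Or.inr hu)⟩

theorem pvMfold_eq_max (g : Int → Int) (l : List Int) (a v : Int)
    (hub : ∀ t ∈ l, g t ≤ v) (hat : ∃ t ∈ l, g t = v) :
    l.foldl (fun x t => max x (g t)) a = max a v := by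
  apply le_antisymm
  · rw [pvMfold_le_iff]
    exact ⟨le_max_left _ _, fun t ht => le_trans (hub t ht) (le_max_right _ _)⟩
  · have hself := (pvMfold_le_iff g l a (l.foldl (fun x t => max x (g t)) a)).1 le_rfl
    obtain ⟨t, ht, hgt⟩ := hat
    exact max_le hself.1 (hgt ▸ hself.2 t ht)

theorem pvMfold_eq_of_mem (g : Int → Int) (l₁ l₂ : List Int) (a : Int)
    (h : ∀ t, t ∈ l₁ ↔ t ∈ l₂) :
    l₁.foldl (fun x t => max x (g t)) a = l₂.foldl (fun x t => max x (g t)) a := by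
  apply le_antisymm
  · rw [pvMfold_le_iff]
    have := (pvMfold_le_iff g l₂ a _).1 le_rfl
    exact ⟨this.1, fun t ht => this.2 t ((h t).1 ht)⟩
  · rw [pvMfold_le_iff]
    have := (pvMfold_le_iff g l₁ a _).1 le_rfl
    exact ⟨this.1, fun t ht => this.2 t ((h t).2 ht)⟩

theorem pvPairs_stab (adjf : Int → List Int) (qs : List Int) (src : Int) :
    pvPairs adjf qs src (pvM adjf qs src + 1) = pvPairs adjf qs src (pvM adjf qs src) := by
  show pvPairs adjf qs src (pvM adjf qs src) ++ _ = _
  rw [pvM_stab]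
  simp

theorem pvRS_src_mem (adjf : Int → List Int) (qs : List Int) (src : Int) (k : Nat) :
    src ∈ pvRS adjf qs src k := by
  induction k with
  | zero => simp [pvRS]
  | succ k ih => exact List.mem_append.2 (Or.inl ih)

theorem pvPairs_exists (adjf : Int → List Int) (qs : List Int) (src : Int) (k : Nat)
    (tgt : Int) (h : tgt ∈ pvRS adjf qs src k) :
    ∃ c, (tgt, c) ∈ pvPairs adjf qs src k := by
  rw [← pvPairs_fst adjf qs src k] at h
  obtain ⟨p, hp, hfst⟩ := List.mem_map.1 h
  exact ⟨p.2, by rwa [show (tgt, p.2) = p from Prod.ext hfst.symm rfl]⟩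

theorem pvOfList_len : ∀ (xs : List Int) (s : List Int),
    (xs.foldl PySem.Set.add s).length ≤ s.length + xs.length := by
  intro xs
  induction xs with
  | nil => simp
  | cons x t ih =>
    intro s
    have h1 : (PySem.Set.add s x).length ≤ s.length + 1 := by
      simp only [PySem.Set.add]
      split <;> simp
    have := ih (PySem.Set.add s x)
    simp only [List.foldl_cons, List.length_cons]
    omega

def pvVal (adj : PySem.Dict Int (List Int)) (qs : List Int) (nq : Int) (src : Int) : Int :=
  if (∀ t ∈ qs, t ∈ pvRS (pvAdjf adj) qs src (pvM (pvAdjf adj) qs src))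
  then ((pvM (pvAdjf adj) qs src) : Int) else nq * 3

-- bounds: m + 1 ≤ |RS m| ≤ |qs| ≤ |qubits|
theorem pvBounds (adj : PySem.Dict Int (List Int)) (qubits : List Int) (src : Int)
    (hsrc : src ∈ PySem.Set.ofList qubits) :
    pvM (pvAdjf adj) (PySem.Set.ofList qubits) src + 1 ≤
        (pvRS (pvAdjf adj) (PySem.Set.ofList qubits) src
          (pvM (pvAdjf adj) (PySem.Set.ofList qubits) src)).length ∧
      (pvRS (pvAdjf adj) (PySem.Set.ofList qubits) src
        (pvM (pvAdjf adj) (PySem.Set.ofList qubits) src)).length ≤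
        (PySem.Set.ofList qubits).length ∧
      (PySem.Set.ofList qubits).length ≤ qubits.length := by
  set qs := PySem.Set.ofList qubits with hqs
  refine ⟨pvM_ge (pvAdjf adj) qs src, ?_, ?_⟩
  · have hsub : pvRS (pvAdjf adj) qs src (pvM (pvAdjf adj) qs src) ⊆ qs := by
      intro v hv
      rcases List.mem_cons.1 (pvRS_sub (pvAdjf adj) qs src _ v hv) with rfl | h
      · exact hsrc
      · exact h
    have := ((pvRS_nodup (pvAdjf adj) qs src _).subperm hsub).length_le
    exact this
  · have := pvOfList_len qubits []
    simpa [PySem.Set.ofList] using this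

theorem pvPerSrcA (adj : PySem.Dict Int (List Int)) (qubits : List Int) (src : Int)
    (hsrc : src ∈ PySem.Set.ofList qubits) (md : Int) :
    qubits.foldl (fun md tgt =>
      if (PySem.Dict.mk (pvPairs (pvAdjf adj) (PySem.Set.ofList qubits) src
            (pvM (pvAdjf adj) (PySem.Set.ofList qubits) src + 1))).contains tgt
      then max md ((PySem.Dict.mk (pvPairs (pvAdjf adj) (PySem.Set.ofList qubits) src
            (pvM (pvAdjf adj) (PySem.Set.ofList qubits) src + 1))).getD tgt 0)
      else max md (PySem.List.len qubits * 3)) md =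
    max md (pvVal adj (PySem.Set.ofList qubits) (PySem.List.len qubits) src) := by
  set qs := PySem.Set.ofList qubits with hqs
  set m := pvM (pvAdjf adj) qs src with hm
  set D := PySem.Dict.mk (pvPairs (pvAdjf adj) qs src (m + 1)) with hD
  have hpairsstab : pvPairs (pvAdjf adj) qs src (m + 1) = pvPairs (pvAdjf adj) qs src m :=
    pvPairs_stab (pvAdjf adj) qs src
  have hndkeys : ((pvPairs (pvAdjf adj) qs src m).map Prod.fst).Nodup := by
    rw [pvPairs_fst]; exact pvRS_nodup (pvAdjf adj) qs src m
  have hcont : ∀ tgt, D.contains tgt =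
      decide (tgt ∈ pvRS (pvAdjf adj) qs src m) := by
    intro tgt
    rw [hD, hpairsstab, pvDict_contains, pvPairs_fst]
  have hgetD : ∀ tgt c, (tgt, c) ∈ pvPairs (pvAdjf adj) qs src m → D.getD tgt 0 = c := by
    intro tgt c hmem
    rw [hD, hpairsstab]
    exact pvDict_getD _ _ _ hmem hndkeys
  obtain ⟨hb1, hb2, hb3⟩ := pvBounds adj qubits src hsrc
  rw [← hqs] at hb1 hb2 hb3
  rw [← hm] at hb1 hb2
  have hmlt : (m : Int) < PySem.List.len qubits * 3 := by
    simp only [PySem.List.len_eq]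
    have h1 : 1 ≤ qubits.length := by
      have : qs ≠ [] := by rintro h; rw [h] at hsrc; simp at hsrc
      have : 1 ≤ qs.length := List.length_pos_iff.2 this
      omega
    push_cast
    omega
  -- rewrite the body as a max-fold
  rw [PySem.List.foldl_congr_mem qubits _ (fun md tgt => max md
      (if D.contains tgt then D.getD tgt 0 else PySem.List.len qubits * 3)) md
      (by intro acc x _; by_cases h : D.contains x <;> simp [h])]
  by_cases hall : ∀ t ∈ qs, t ∈ pvRS (pvAdjf adj) qs src m
  · have hval : pvVal adj qs (PySem.List.len qubits) src = (m : Int) := by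
      rw [pvVal, if_pos hall]
    rw [hval]
    apply pvMfold_eq_max
    · intro t ht
      have htq : t ∈ qs := by rw [hqs]; exact (PySem.Set.mem_ofList qubits t).2 ht
      have htR := hall t htq
      rw [hcont t, decide_eq_true htR, if_pos rfl]
      obtain ⟨c, hc⟩ := pvPairs_exists (pvAdjf adj) qs src m t htR
      rw [hgetD t c hc]
      exact (pvPairs_val_le (pvAdjf adj) qs src m (t, c) hc).2
    · by_cases hm0 : m = 0
      · refine ⟨src, (PySem.Set.mem_ofList qubits src).1 (hqs ▸ hsrc), ?_⟩
        have hsR : src ∈ pvRS (pvAdjf adj) qs src m := pvRS_src_mem _ _ _ _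
        rw [hcont src, decide_eq_true hsR, if_pos rfl]
        rw [hgetD src 0 (pvPairs_mono (pvAdjf adj) qs src 0 m (by omega) _ (by simp [pvPairs]))]
        rw [hm0]
        simp
      · have hrw : m = (m - 1) + 1 := by omega
        have hne : pvF (pvAdjf adj) qs src m ≠ [] := by
          rw [hrw]
          show pvDiscAll _ _ _ _ ≠ []
          exact pvM_lt (pvAdjf adj) qs src (m - 1) (by omega)
        obtain ⟨v, hv⟩ := List.exists_mem_of_ne_nil _ hne
        have hv' : v ∈ pvDiscAll (pvAdjf adj) qs (pvRS (pvAdjf adj) qs src (m - 1))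
            (pvRS (pvAdjf adj) qs src (m - 1)) := by
          rw [hrw] at hv
          exact hv
        have hvq : v ∈ qs := (pvDiscAll_sub (pvAdjf adj) qs _ _ v hv').1
        have hvR : v ∈ pvRS (pvAdjf adj) qs src m := by
          rw [hrw]
          exact List.mem_append.2 (Or.inr hv')
        refine ⟨v, (PySem.Set.mem_ofList qubits v).1 (hqs ▸ hvq), ?_⟩
        rw [hcont v, decide_eq_true hvR, if_pos rfl]
        exact hgetD v (m : Int) (pvF_pair (pvAdjf adj) qs src m v hv)
  · have hval : pvVal adj qs (PySem.List.len qubits) src = PySem.List.len qubits * 3 := by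
      rw [pvVal, if_neg hall]
    rw [hval]
    apply pvMfold_eq_max
    · intro t _
      split
      · rename_i hcontt
        rw [hcont t] at hcontt
        have htR := of_decide_eq_true hcontt
        obtain ⟨c, hc⟩ := pvPairs_exists (pvAdjf adj) qs src m t htR
        rw [hgetD t c hc]
        have := (pvPairs_val_le (pvAdjf adj) qs src m (t, c) hc).2
        omega
      · exact le_rfl
    · push_neg at hall
      obtain ⟨t₀, ht₀q, ht₀R⟩ := hall
      refine ⟨t₀, (PySem.Set.mem_ofList qubits t₀).1 (hqs ▸ ht₀q), ?_⟩
      rw [hcont t₀, decide_eq_false ht₀R]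
      simp

theorem pvEqual_iff (s t : List Int) (hsub : ∀ x ∈ s, x ∈ t) :
    PySem.Set.equal s t = true ↔ ∀ x ∈ t, x ∈ s := by
  simp only [PySem.Set.equal, PySem.Set.issubset, PySem.Set.contains, Bool.and_eq_true,
    List.all_eq_true, List.contains_iff_mem]
  constructor
  · rintro ⟨_, h2⟩ x hx; exact h2 x hx
  · intro h; exact ⟨fun x hx => hsub x hx, h⟩

theorem pvPerSrcB (adj : PySem.Dict Int (List Int)) (qubits : List Int) (src : Int)
    (hsrc : src ∈ PySem.Set.ofList qubits) (best : Int) :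
    max best (if PySem.Set.equal
        (pvBLoop adj (PySem.Set.ofList qubits) qubits.length
          (PySem.Set.add PySem.Set.empty src) 0).1 (PySem.Set.ofList qubits)
      then (pvBLoop adj (PySem.Set.ofList qubits) qubits.length
          (PySem.Set.add PySem.Set.empty src) 0).2
      else 3 * PySem.List.len qubits) =
    max best (pvVal adj (PySem.Set.ofList qubits) (PySem.List.len qubits) src) := by
  set qs := PySem.Set.ofList qubits with hqs
  set m := pvM (pvAdjf adj) qs src with hm
  obtain ⟨hb1, hb2, hb3⟩ := pvBounds adj qubits src hsrc
  rw [← hqs] at hb1 hb2 hb3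
  rw [← hm] at hb1 hb2
  have hadd : PySem.Set.add PySem.Set.empty src = pvRS (pvAdjf adj) qs src 0 := by
    simp [PySem.Set.add, PySem.Set.empty, PySem.Set.contains, pvRS]
  have hbrun := pvBRun adj qs src m 0 (by omega) qubits.length (by omega)
  simp only [Nat.cast_zero] at hbrun
  rw [hadd, hbrun]
  have hsubRS : ∀ x ∈ pvRS (pvAdjf adj) qs src m, x ∈ qs := by
    intro v hv
    rcases List.mem_cons.1 (pvRS_sub (pvAdjf adj) qs src m v hv) with rfl | h
    · exact hsrc
    · exact h
  by_cases hall : ∀ t ∈ qs, t ∈ pvRS (pvAdjf adj) qs src m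
  · rw [if_pos ((pvEqual_iff _ _ hsubRS).2 hall)]
    rw [pvVal, if_pos hall]
  · rw [if_neg (by
      intro hc
      exact hall ((pvEqual_iff _ _ hsubRS).1 hc))]
    rw [pvVal, if_neg hall]
    ring

theorem pvMain (qubits : List Int) (adjacency : List (Int × List Int)) :
    max_shortest_path_py qubits adjacency = max_shortest_path_py_alt qubits adjacency := by
  simp only [max_shortest_path_py, max_shortest_path_py_alt]
  rw [PySem.List.foldl_congr_mem qubits _
    (fun md src => max md (pvVal (PySem.Dict.mk adjacency) (PySem.Set.ofList qubits)
      (PySem.List.len qubits) src)) 0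
    (by
      intro acc src hsrcQ
      have hsrc : src ∈ PySem.Set.ofList qubits := (PySem.Set.mem_ofList qubits src).2 hsrcQ
      obtain ⟨hb1, hb2, hb3⟩ := pvBounds (PySem.Dict.mk adjacency) qubits src hsrc
      have hprev : pvPrev (pvAdjf (PySem.Dict.mk adjacency)) (PySem.Set.ofList qubits) src 0
          = 0 := rfl
      have hrun := pvRun (PySem.Dict.mk adjacency) (PySem.Set.ofList qubits) src
        (pvM (pvAdjf (PySem.Dict.mk adjacency)) (PySem.Set.ofList qubits) src) 0 (by omega)
        ((qubits.length + 1) -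
          (pvRS (pvAdjf (PySem.Dict.mk adjacency)) (PySem.Set.ofList qubits) src
            (pvM (pvAdjf (PySem.Dict.mk adjacency)) (PySem.Set.ofList qubits) src)).length)
      rw [hprev] at hrun
      simp only [Nat.sub_zero] at hrun
      rw [show (pvRS (pvAdjf (PySem.Dict.mk adjacency)) (PySem.Set.ofList qubits) src
            (pvM (pvAdjf (PySem.Dict.mk adjacency)) (PySem.Set.ofList qubits) src)).length +
          ((qubits.length + 1) -
            (pvRS (pvAdjf (PySem.Dict.mk adjacency)) (PySem.Set.ofList qubits) src
              (pvM (pvAdjf (PySem.Dict.mk adjacency)) (PySem.Set.ofList qubits) src)).length)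
          = qubits.length + 1 from by omega] at hrun
      simp only [pvRS, pvPairs] at hrun
      rw [hrun]
      exact pvPerSrcA (PySem.Dict.mk adjacency) qubits src hsrc acc)]
  rw [PySem.List.foldl_congr_mem (PySem.Set.ofList qubits) _
    (fun best src => max best (pvVal (PySem.Dict.mk adjacency) (PySem.Set.ofList qubits)
      (PySem.List.len qubits) src)) 0
    (by
      intro acc src hsrc
      exact pvPerSrcB (PySem.Dict.mk adjacency) qubits src hsrc acc)]
  exact pvMfold_eq_of_mem _ qubits (PySem.Set.ofList qubits) 0
    (fun t => ⟨fun h => (PySem.Set.mem_ofList qubits t).2 h,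
      fun h => (PySem.Set.mem_ofList qubits t).1 h⟩)

-- ===== VERDICT (by name: the statement is the Claim_ definition above) =====
theorem max_shortest_path_py_spec : Claim_equal_max_shortest_path_py := by
  intro qubits adjacency _ _
  unfold Spec_max_shortest_path_py
  exact pvMain qubits adjacency
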